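-- pv_equiv track=rewrite | github.com/motifQuestPuja/DNA-Motif-Finder | pjst.py | consensus_motif
-- ===== SOURCE A (Python) =====
-- def count_matrix(motifs):
--     k = len(motifs[0])
--     count = {'A':[0]*k, 'C':[0]*k, 'G':[0]*k, 'T':[0]*k}
--     for motif in motifs:
--         for i, nuc in enumerate(motif):
--             count[nuc][i] += 1
--     return count
--
-- def consensus_motif(motifs):
--     count = count_matrix(motifs)
--     consensus = ""
--     for i in range(len(motifs[0])):
--         max_freq = 0
--         max_nuc = ""
--         for nuc in "ACGT":
--             if count[nuc][i] > max_freq: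
--                 max_freq = count[nuc][i]
--                 max_nuc = nuc
--         consensus += max_nuc
--     return consensus
-- ===== SOURCE B (Python) =====
-- def consensus_motif(motifs):
--     k = len(motifs[0])
--     res = []
--     for i in range(k):
--         column = sorted(m[i] for m in motifs if i < len(m))
--         best_ch, best_len = "", 0
--         run_ch, run_len = "", 0
--         for ch in column:
--             if ch == run_ch:
--                 run_len += 1
--             else:
--                 run_ch, run_len = ch, 1
--             if run_len > best_len:
--                 best_ch, best_len = run_ch, run_len
--         res.append(best_ch)
--     return "".join(res)
-- ===== Notes on version B (the rewrite author's own statement) =====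
-- stated objective: alternative
-- what changed: B finds each column's consensus by a sort-based mode computation — sort the column's characters and scan once for the longest run (the ascending sort realises A's 'ACGT' tie-break) — instead of A's two-phase count-matrix build over all motifs followed by a max-scan of the matrix; no counts are ever tabulated.
import Mathlib
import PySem

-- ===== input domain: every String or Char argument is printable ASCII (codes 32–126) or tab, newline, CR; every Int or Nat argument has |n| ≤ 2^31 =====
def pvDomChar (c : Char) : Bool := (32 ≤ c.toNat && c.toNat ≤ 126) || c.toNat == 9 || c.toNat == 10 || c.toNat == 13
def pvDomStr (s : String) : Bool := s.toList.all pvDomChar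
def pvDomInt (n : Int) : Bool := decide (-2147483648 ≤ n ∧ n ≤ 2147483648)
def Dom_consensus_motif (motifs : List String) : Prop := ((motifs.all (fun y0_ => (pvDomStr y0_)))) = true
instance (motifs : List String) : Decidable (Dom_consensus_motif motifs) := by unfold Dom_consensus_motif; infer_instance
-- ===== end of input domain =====

-- B computes each column's consensus by sorting the column and scanning for its longest run
-- (sort-based mode; the sort order gives A's 'ACGT' tie-break), instead of A's 4xk count matrix
-- plus a second max-scan pass (objective: alternative; return value only, nothing is mutated).


-- ===== PORT A =====
-- count[nuc][i] += 1 (the KeyError/IndexError cases are outside Pre_; getD/pySetD are the total forms)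
def pvCMStep (d : PySem.Dict Char (List Int)) (p : Int × Char) : PySem.Dict Char (List Int) :=
  d.modify p.2 [] (fun l => PySem.List.pySetD l p.1 (PySem.List.pyGetD l p.1 0 + 1))

-- count_matrix(motifs); k = len(motifs[0]) (IndexError on an empty list is outside Pre_)
def pvCountMatrix (motifs : List String) : PySem.Dict Char (List Int) :=
  let k := (PySem.List.pyGetD motifs 0 "").toList.length
  motifs.foldl
    (fun count motif => (PySem.List.enumerate motif.toList 0).foldl pvCMStep count)
    (PySem.Dict.ofList [('A', List.replicate k (0:Int)), ('C', List.replicate k (0:Int)),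
                        ('G', List.replicate k (0:Int)), ('T', List.replicate k (0:Int))])

-- the consensus string is accumulated as a List Char (Python str concatenation), String.ofList at the end
def consensus_motif (motifs : List String) : String :=
  String.ofList ((PySem.List.pyRange 0 (PySem.Str.len (PySem.List.pyGetD motifs 0 "")) 1).foldl
    (fun consensus i =>
      consensus ++ (['A','C','G','T'].foldl
        (fun st nuc =>
          if PySem.List.pyGetD ((pvCountMatrix motifs).getD nuc []) i 0 > st.1
          then (PySem.List.pyGetD ((pvCountMatrix motifs).getD nuc []) i 0, [nuc])
          else st)
        ((0:Int), ([] : List Char))).2)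
    [])

-- ===== PORT B =====
-- column = sorted(m[i] for m in motifs if i < len(m)); Python single-char strings are List Char values
def pvColumn (motifs : List String) (i : Int) : List Char :=
  PySem.List.sorted
    (motifs.filterMap (fun m =>
      if i < PySem.Str.len m then some ((PySem.Str.pyGet? m i).getD ' ') else none))
    (fun x => x) false

-- one step of the run scan; state = ((best_ch, best_len), (run_ch, run_len)), "" = []
def pvScanStep (st : (List Char × Int) × (List Char × Int)) (ch : Char) :
    (List Char × Int) × (List Char × Int) :=
  let run := if st.2.1 = [ch] then (st.2.1, st.2.2 + 1) else ([ch], (1:Int))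
  let best := if run.2 > st.1.2 then run else st.1
  (best, run)

def consensus_motif_alt (motifs : List String) : String :=
  String.ofList ((PySem.List.pyRange 0 (PySem.Str.len (PySem.List.pyGetD motifs 0 "")) 1).foldl
    (fun out i =>
      out ++ ((pvColumn motifs i).foldl pvScanStep ((([] : List Char), (0:Int)), (([] : List Char), (0:Int)))).1.1)
    [])

-- ===== PRECONDITION & SPEC =====
-- Pre_ is exactly where Python A returns: a non-empty list, every motif at most as long as motifs[0]
-- (a longer one hits IndexError) and made of A/C/G/T characters only (anything else hits KeyError).
def Pre_consensus_motif (motifs : List String) : Prop :=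
  motifs ≠ [] ∧ ∀ m ∈ motifs,
    m.toList.length ≤ (motifs.headD "").toList.length ∧
    ∀ j < m.toList.length, m.toList.getD j ' ' ∈ (['A','C','G','T'] : List Char)
instance (motifs : List String) : Decidable (Pre_consensus_motif motifs) := by
  unfold Pre_consensus_motif; infer_instance

def pvWitness_consensus_motif : List String := ["AC", "G"]

def Spec_consensus_motif (motifs : List String) (out : String) : Prop := out = consensus_motif_alt motifs
instance (motifs : List String) (out : String) : Decidable (Spec_consensus_motif motifs out) := by
  unfold Spec_consensus_motif; infer_instance

-- ===== CLAIM (what is proved, stated in full; the proofs are below) =====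
def Claim_equal_consensus_motif : Prop := ∀ (motifs : List String), Dom_consensus_motif motifs → Pre_consensus_motif motifs → Spec_consensus_motif motifs (consensus_motif motifs)

-- ===== LEMMAS AND PROOFS =====

-- the character-level reading of Pre_'s third conjunct
lemma pv_pre_chars (motifs : List String) (h : Pre_consensus_motif motifs) :
    ∀ m ∈ motifs, ∀ c ∈ m.toList, c ∈ (['A','C','G','T'] : List Char) := by
  intro m hm c hc
  obtain ⟨j, hj, rfl⟩ := List.mem_iff_getElem.mp hc
  have := (h.2 m hm).2 j hj
  rwa [List.getD_eq_getElem _ _ hj] at this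

-- the column-t character multiset that both programs examine
def pvCol (motifs : List String) (t : Nat) : List Char :=
  motifs.filterMap (fun m => m.toList[t]?)

lemma pv_length_pySetD (xs : List Int) (i : Int) (v : Int) :
    (PySem.List.pySetD xs i v).length = xs.length := by
  unfold PySem.List.pySetD PySem.List.pySet?
  cases h : PySem.List.pyIdx? xs.length i <;> simp

lemma pv_pySetD_natCast (xs : List Int) (n : Nat) (v : Int) (h : n < xs.length) :
    PySem.List.pySetD xs (n : Int) v = xs.set n v := by
  unfold PySem.List.pySetD PySem.List.pySet? PySem.List.pyIdx?
  simp [h]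

lemma pv_getD_set (xs : List Int) (s t : Nat) (v : Int) :
    (xs.set s v).getD t 0 = if t = s ∧ s < xs.length then v else xs.getD t 0 := by
  simp only [List.getD_eq_getElem?_getD, List.getElem?_set]
  split_ifs <;> simp_all

lemma pv_inner_len (ps : List (Int × Char)) (d : PySem.Dict Char (List Int)) (c : Char) :
    ((ps.foldl pvCMStep d).getD c []).length = (d.getD c []).length := by
  induction ps generalizing d with
  | nil => rfl
  | cons p ps ih =>
    rw [List.foldl_cons, ih]
    show ((d.modify p.2 [] _).getD c []).length = _
    rw [PySem.Dict.getD_modify]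
    split_ifs with h
    · rw [pv_length_pySetD, h]
    · rfl

lemma pv_inner_getD (K : Nat) (cs : List Char) (s : Nat) (d : PySem.Dict Char (List Int))
    (hcs : ∀ ch ∈ cs, ch ∈ (['A','C','G','T'] : List Char))
    (hlen : ∀ c' ∈ (['A','C','G','T'] : List Char), (d.getD c' []).length = K)
    (hsz : s + cs.length ≤ K)
    (c : Char) (t : Nat) :
    PySem.List.pyGetD (((PySem.List.enumerate cs (s : Int)).foldl pvCMStep d).getD c []) (t : Int) 0
      = PySem.List.pyGetD (d.getD c []) (t : Int) 0
        + (if s ≤ t ∧ cs[t - s]? = some c then 1 else 0) := by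
  induction cs generalizing s d with
  | nil => simp [PySem.List.enumerate]
  | cons x cs ih =>
    rw [PySem.List.enumerate_cons, List.foldl_cons]
    have hcast : ((s : Int) + 1) = ((s + 1 : Nat) : Int) := by push_cast; ring
    have hx : x ∈ (['A','C','G','T'] : List Char) := hcs x List.mem_cons_self
    have hlen1 : ∀ c' ∈ (['A','C','G','T'] : List Char), ((pvCMStep d ((s : Int), x)).getD c' []).length = K := by
      intro c' hc'
      show ((d.modify x [] _).getD c' []).length = K
      rw [PySem.Dict.getD_modify]
      split_ifs with h
      · rw [pv_length_pySetD]; exact hlen _ hx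
      · exact hlen c' hc'
    have hsK : s < K := by simp at hsz; omega
    have hsz' : (s + 1) + cs.length ≤ K := by simp at hsz; omega
    rw [hcast, ih (s + 1) (pvCMStep d ((s : Int), x)) (fun ch hch => hcs ch (List.mem_cons_of_mem _ hch)) hlen1 hsz']
    have hd1 : PySem.List.pyGetD ((pvCMStep d ((s : Int), x)).getD c []) (t : Int) 0
        = PySem.List.pyGetD (d.getD c []) (t : Int) 0 + (if t = s ∧ c = x then 1 else 0) := by
      show PySem.List.pyGetD ((d.modify x [] _).getD c []) (t : Int) 0 = _
      rw [PySem.Dict.getD_modify]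
      split_ifs with h h2 h2
      · subst h
        obtain ⟨hts, -⟩ := h2
        subst hts
        rw [pv_pySetD_natCast _ t _ (by rw [hlen c hx]; omega)]
        simp only [PySem.List.pyGetD_natCast]
        rw [pv_getD_set]
        have : t = t ∧ t < (d.getD c []).length := ⟨rfl, by rw [hlen c hx]; omega⟩
        rw [if_pos this]
      · subst h
        rw [pv_pySetD_natCast _ s _ (by rw [hlen _ hx]; exact hsK)]
        simp only [PySem.List.pyGetD_natCast]
        rw [pv_getD_set, if_neg (by tauto)]
        omega
      · exact absurd h2.2 h
      · omega
    rw [hd1]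
    rcases Nat.lt_trichotomy t s with hts | hts | hts
    · have h1 : ¬ (s ≤ t) := by omega
      have h2 : ¬ (s + 1 ≤ t) := by omega
      have h3 : ¬ (t = s) := by omega
      simp [h1, h2, h3]
    · subst hts
      have h0 : t - t = 0 := by omega
      have h2 : ¬ (t + 1 ≤ t) := by omega
      simp [h2]
      by_cases hcx : c = x
      · subst hcx; simp
      · simp [hcx, Ne.symm hcx]
    · have h1 : s ≤ t := by omega
      have h2 : s + 1 ≤ t := by omega
      have h3 : ¬ (t = s) := by omega
      have h4 : (x :: cs)[t - s]? = cs[t - (s + 1)]? := by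
        have : t - s = (t - (s + 1)) + 1 := by omega
        rw [this]; simp
      simp [h1, h2, h3, h4]

lemma pv_inner_getD0 (K : Nat) (cs : List Char) (d : PySem.Dict Char (List Int))
    (hcs : ∀ ch ∈ cs, ch ∈ (['A','C','G','T'] : List Char))
    (hlen : ∀ c' ∈ (['A','C','G','T'] : List Char), (d.getD c' []).length = K)
    (hsz : cs.length ≤ K)
    (c : Char) (t : Nat) :
    PySem.List.pyGetD (((PySem.List.enumerate cs 0).foldl pvCMStep d).getD c []) (t : Int) 0
      = PySem.List.pyGetD (d.getD c []) (t : Int) 0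
        + (if cs[t]? = some c then 1 else 0) := by
  simpa using pv_inner_getD K cs 0 d hcs hlen (by omega) c t

lemma pv_outer (K : Nat) (ms : List String) (d : PySem.Dict Char (List Int))
    (hms : ∀ m ∈ ms, m.toList.length ≤ K)
    (hchars : ∀ m ∈ ms, ∀ ch ∈ m.toList, ch ∈ (['A','C','G','T'] : List Char))
    (hlen : ∀ c' ∈ (['A','C','G','T'] : List Char), (d.getD c' []).length = K)
    (c : Char) (t : Nat) :
    PySem.List.pyGetD
      ((ms.foldl (fun count motif => (PySem.List.enumerate motif.toList 0).foldl pvCMStep count) d).getD c [])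
      (t : Int) 0
      = PySem.List.pyGetD (d.getD c []) (t : Int) 0 + ((pvCol ms t).count c : Int) := by
  induction ms generalizing d with
  | nil => simp [pvCol]
  | cons m ms ih =>
    rw [List.foldl_cons]
    have hlen1 : ∀ c' ∈ (['A','C','G','T'] : List Char), (((PySem.List.enumerate m.toList 0).foldl pvCMStep d).getD c' []).length = K := by
      intro c' hc'; rw [pv_inner_len]; exact hlen c' hc'
    rw [ih _ (fun x hx => hms x (List.mem_cons_of_mem _ hx)) (fun x hx => hchars x (List.mem_cons_of_mem _ hx)) hlen1]
    rw [pv_inner_getD0 K m.toList d (hchars m List.mem_cons_self) hlen (hms m (List.mem_cons_self)) c t]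
    unfold pvCol
    rw [List.filterMap_cons]
    cases h : m.toList[t]? with
    | none => simp
    | some ch =>
      simp only [List.count_cons]
      by_cases hch : ch = c
      · subst hch; simp; ring
      · simp [hch]

lemma pv_cm_getD (motifs : List String) (hpre : Pre_consensus_motif motifs)
    (c : Char) (hc : c ∈ (['A','C','G','T'] : List Char))
    (t : Nat) (ht : t < (PySem.List.pyGetD motifs 0 "").toList.length) :
    PySem.List.pyGetD ((pvCountMatrix motifs).getD c []) (t : Int) 0
      = ((pvCol motifs t).count c : Int) := by
  have hne := hpre.1
  set K := (PySem.List.pyGetD motifs 0 "").toList.length with hK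
  have hhead : (PySem.List.pyGetD motifs 0 "") = motifs.headD "" := by
    cases motifs with
    | nil => exact absurd rfl hne
    | cons m0 ms => simp [PySem.List.pyGetD_zero_cons]
  have hms : ∀ m ∈ motifs, m.toList.length ≤ K := by
    intro m hm; rw [hK, hhead]; exact (hpre.2 m hm).1
  have hchars : ∀ m ∈ motifs, ∀ ch ∈ m.toList, ch ∈ (['A','C','G','T'] : List Char) :=
    pv_pre_chars motifs hpre
  have hlen : ∀ c' ∈ (['A','C','G','T'] : List Char), (((PySem.Dict.ofList [('A', List.replicate K (0:Int)), ('C', List.replicate K (0:Int)),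
                        ('G', List.replicate K (0:Int)), ('T', List.replicate K (0:Int))]) : PySem.Dict Char (List Int)).getD c' []).length = K := by
    intro c' hc'
    fin_cases hc' <;>
      simp [PySem.Dict.ofList, PySem.Dict.update, PySem.Dict.getD, PySem.Dict.get?,
            PySem.Dict.insert, PySem.Dict.empty, PySem.Dict.contains]
  unfold pvCountMatrix
  rw [pv_outer K motifs _ hms hchars hlen c t]
  have hrep : ∀ c' ∈ (['A','C','G','T'] : List Char), ((PySem.Dict.ofList [('A', List.replicate K (0:Int)), ('C', List.replicate K (0:Int)),
                        ('G', List.replicate K (0:Int)), ('T', List.replicate K (0:Int))]) : PySem.Dict Char (List Int)).getD c' [] = List.replicate K 0 := by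
    intro c' hc'
    fin_cases hc' <;>
      simp [PySem.Dict.ofList, PySem.Dict.update, PySem.Dict.getD, PySem.Dict.get?,
            PySem.Dict.insert, PySem.Dict.empty, PySem.Dict.contains]
  rw [hrep c hc]
  simp [List.getD_eq_getElem?_getD, List.getElem?_replicate]
  split_ifs <;> simp

-- ---- B-side lemmas ----

-- the unsorted column generator equals pvCol
lemma pv_column_unsorted (motifs : List String) (t : Nat) :
    motifs.filterMap (fun m =>
      if (t : Int) < PySem.Str.len m then some ((PySem.Str.pyGet? m (t : Int)).getD ' ') else none)
      = pvCol motifs t := by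
  unfold pvCol
  induction motifs with
  | nil => rfl
  | cons m ms ih =>
    rw [List.filterMap_cons, List.filterMap_cons, ih]
    have hlm : (PySem.Str.len m) = (m.toList.length : Int) := by simp [PySem.Str.len]
    by_cases h : t < m.toList.length
    · rw [if_pos (by omega)]
      have hg : PySem.Str.pyGet? m (t : Int) = some m.toList[t] := by
        simp [PySem.Str.pyGet?, List.getElem?_eq_getElem h]
      rw [hg, List.getElem?_eq_getElem h]
      simp
    · rw [if_neg (by omega), List.getElem?_eq_none (by omega)]

-- sorted column of A/C/G/T chars is four blocks of replicated chars, one per count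
lemma pv_sorted_blocks (l : List Char) (h : ∀ c ∈ l, c ∈ (['A','C','G','T'] : List Char)) :
    PySem.List.sorted l (fun x => x) false
      = List.replicate (l.count 'A') 'A' ++ List.replicate (l.count 'C') 'C'
        ++ List.replicate (l.count 'G') 'G' ++ List.replicate (l.count 'T') 'T' := by
  apply PySem.List.sorted_id_eq_of_perm_of_pairwise
  · apply List.perm_iff_count.mpr
    intro c
    by_cases hA : c = 'A'
    · subst hA; simp [List.count_append, List.count_replicate]
    by_cases hC : c = 'C'
    · subst hC; simp [List.count_append, List.count_replicate, hA]
    by_cases hG : c = 'G'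
    · subst hG; simp [List.count_append, List.count_replicate]
    by_cases hT : c = 'T'
    · subst hT; simp [List.count_append, List.count_replicate]
    have hc0 : l.count c = 0 := List.count_eq_zero.mpr (fun hc => by
      have := h c hc; simp [hA, hC, hG, hT] at this)
    simp [List.count_append, List.count_replicate, hA, hC, hG, hT, hc0,
          Ne.symm hA, Ne.symm hC, Ne.symm hG, Ne.symm hT]
  · have rep : ∀ (x : Char) (n : Nat) (l : List Char), l.Pairwise (· ≤ ·) →
        (∀ y ∈ l, x ≤ y) → (List.replicate n x ++ l).Pairwise (· ≤ ·) := by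
      intro x n l hl hx
      refine List.pairwise_append.mpr ⟨List.pairwise_replicate.mpr (Or.inr le_rfl), hl, ?_⟩
      intro a ha b hb
      rw [(List.mem_replicate.mp ha).2]
      exact hx b hb
    rw [List.append_assoc, List.append_assoc]
    apply rep _ _ _ (rep _ _ _ (rep _ _ _ (List.pairwise_replicate.mpr (Or.inr le_rfl)) ?_) ?_) ?_
    all_goals
      intro y hy
      simp only [List.mem_append, List.mem_replicate] at hy
      first
        | (rcases hy with (⟨-, rfl⟩ | ⟨-, rfl⟩ | ⟨-, rfl⟩) <;> decide)
        | (rcases hy with (⟨-, rfl⟩ | ⟨-, rfl⟩) <;> decide)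
        | (rcases hy with ⟨-, rfl⟩; decide)

-- scanning a fresh block of n equal chars: run becomes the block, best updates iff n beats it
lemma pv_scan_cont (n : Nat) (c : Char) (b : List Char × Int) (l : Int)
    (hbl : l ≤ b.2) :
    (List.replicate n c).foldl pvScanStep (b, ([c], l))
      = ((if l + n > b.2 then ([c], l + n) else b), ([c], l + (n : Int))) := by
  induction n generalizing b l with
  | zero =>
    rw [List.replicate_zero, List.foldl_nil, if_neg (by push_cast; omega)]
    simp
  | succ n ih =>
    rw [List.replicate_succ, List.foldl_cons]
    have hstep : pvScanStep (b, ([c], l)) c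
        = ((if l + 1 > b.2 then ([c], l + 1) else b), ([c], l + 1)) := by
      simp [pvScanStep]
    rw [hstep]
    by_cases h1 : l + 1 > b.2
    · rw [if_pos h1, ih ([c], l + 1) (l + 1) (by simp)]
      dsimp only
      push_cast
      split_ifs <;> (try (exfalso; omega)) <;> simp [Prod.mk.injEq] <;> omega
    · rw [if_neg h1, ih b (l + 1) (by omega)]
      push_cast
      split_ifs <;> (try (exfalso; omega)) <;> simp [Prod.mk.injEq] <;> omega

lemma pv_scan_block (n : Nat) (c : Char) (b r : List Char × Int)
    (hb : 0 ≤ b.2) (hr : r.1 ≠ [c]) :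
    (List.replicate n c).foldl pvScanStep (b, r)
      = ((if (n : Int) > b.2 then ([c], (n : Int)) else b),
         (if n = 0 then r else ([c], (n : Int)))) := by
  cases n with
  | zero =>
    rw [List.replicate_zero, List.foldl_nil, if_neg (by push_cast; omega), if_pos rfl]
  | succ n =>
    rw [List.replicate_succ, List.foldl_cons]
    have hstep : pvScanStep (b, r) c
        = ((if 1 > b.2 then ([c], 1) else b), ([c], 1)) := by
      simp [pvScanStep, hr]
    rw [hstep]
    by_cases h1 : 1 > b.2
    · rw [if_pos h1, pv_scan_cont n c ([c], 1) 1 (by simp)]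
      dsimp only
      push_cast
      split_ifs <;> (try (exfalso; omega)) <;> simp [Prod.mk.injEq] <;> omega
    · rw [if_neg h1, pv_scan_cont n c b 1 (by omega)]
      push_cast
      split_ifs <;> (try (exfalso; omega)) <;> simp [Prod.mk.injEq] <;> omega

-- longest-run scan of the four sorted blocks = A's first-strict-max scan over 'ACGT'
lemma pv_run4 (f : Char → Nat) :
    ((List.replicate (f 'A') 'A' ++ List.replicate (f 'C') 'C'
       ++ List.replicate (f 'G') 'G' ++ List.replicate (f 'T') 'T').foldl
        pvScanStep ((([] : List Char), (0:Int)), (([] : List Char), (0:Int)))).1.1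
      = ((['A','C','G','T'] : List Char).foldl
          (fun st nuc => if ((f nuc : Int)) > st.1 then ((f nuc : Int), [nuc]) else st)
          ((0:Int), ([] : List Char))).2 := by
  rw [List.append_assoc, List.append_assoc, List.foldl_append, List.foldl_append,
      List.foldl_append]
  rw [pv_scan_block _ 'A' _ _ (by simp) (by simp)]
  rw [pv_scan_block _ 'C' _ _ (by split <;> simp) (by split <;> simp)]
  rw [pv_scan_block _ 'G' _ _ (by split <;> (try split) <;> simp)
        (by split <;> (try split) <;> simp)]
  rw [pv_scan_block _ 'T' _ _
        (by split <;> (try split) <;> (try split) <;> simp)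
        (by split <;> (try split) <;> (try split) <;> simp)]
  simp only [List.foldl]
  split_ifs <;> simp_all

lemma pv_flatMap_eq_map (l : List Int) (f : Int → List Char) (g : Int → List Char)
    (h : ∀ i ∈ l, f i = g i) : l.flatMap f = l.flatMap g := by
  induction l with
  | nil => rfl
  | cons x l ih =>
    rw [List.flatMap_cons, List.flatMap_cons, h x List.mem_cons_self,
        ih (fun i hi => h i (List.mem_cons_of_mem _ hi))]

theorem pv_main (motifs : List String) (hpre : Pre_consensus_motif motifs) :
    consensus_motif motifs = consensus_motif_alt motifs := by
  unfold consensus_motif consensus_motif_alt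
  rw [PySem.List.foldl_append_eq_flatMap, PySem.List.foldl_append_eq_flatMap]
  congr 1
  apply pv_flatMap_eq_map
  intro i hi
  rw [PySem.List.mem_pyRange_one] at hi
  obtain ⟨h0, hik⟩ := hi
  obtain ⟨t, rfl⟩ : ∃ t : Nat, i = (t : Int) := ⟨i.toNat, (Int.toNat_of_nonneg h0).symm⟩
  have htk : t < (PySem.List.pyGetD motifs 0 "").toList.length := by
    have : (PySem.Str.len (PySem.List.pyGetD motifs 0 "")) = ((PySem.List.pyGetD motifs 0 "").toList.length : Int) := by
      simp [PySem.Str.len]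
    omega
  -- A's inner scan with counts rewritten to column counts
  have hAfold : (['A','C','G','T'].foldl
        (fun st nuc =>
          if PySem.List.pyGetD ((pvCountMatrix motifs).getD nuc []) (t : Int) 0 > st.1
          then (PySem.List.pyGetD ((pvCountMatrix motifs).getD nuc []) (t : Int) 0, [nuc])
          else st)
        ((0:Int), ([] : List Char)))
      = (['A','C','G','T'].foldl
        (fun st nuc => if (((pvCol motifs t).count nuc : Int)) > st.1 then (((pvCol motifs t).count nuc : Int), [nuc]) else st)
        ((0:Int), ([] : List Char))) := by
    apply PySem.List.foldl_congr_mem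
    intro acc x hx
    rw [pv_cm_getD motifs hpre x hx t htk]
  rw [hAfold]
  -- B's column is the four sorted blocks
  have hcolchars : ∀ c ∈ pvCol motifs t, c ∈ (['A','C','G','T'] : List Char) := by
    intro c hc
    unfold pvCol at hc
    obtain ⟨m, hm, hg⟩ := List.mem_filterMap.mp hc
    exact pv_pre_chars motifs hpre m hm c (List.mem_of_getElem? hg)
  have hcol : pvColumn motifs (t : Int)
      = List.replicate ((pvCol motifs t).count 'A') 'A' ++ List.replicate ((pvCol motifs t).count 'C') 'C'
        ++ List.replicate ((pvCol motifs t).count 'G') 'G' ++ List.replicate ((pvCol motifs t).count 'T') 'T' := by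
    unfold pvColumn
    rw [pv_column_unsorted motifs t]
    exact pv_sorted_blocks _ hcolchars
  rw [hcol]
  exact (pv_run4 (fun ch => (pvCol motifs t).count ch)).symm

-- ===== VERDICT (by name: the statement is the Claim_ definition above) =====
theorem consensus_motif_spec : Claim_equal_consensus_motif := by
  intro motifs _ hpre
  unfold Spec_consensus_motif
  exact pv_main motifs hpre
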